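-- pv_equiv track=rewrite | github.com/cutehammond772/problem-solving-archive | 백준/Platinum/16895. 님 게임 3/님 게임 3.py | solve
-- ===== SOURCE A (Python) =====
-- def solve(N, P):
-- 	# 누적 XOR
-- 	left, right = [0] * (N + 2), [0] * (N + 2)
--
-- 	for x in range(1, N + 1):
-- 		left[x] = left[x - 1] ^ P[x]
-- 		right[(N + 1) - x] = right[(N + 1) - (x - 1)] ^ P[(N + 1) - x]
--
-- 	result = 0
--
-- 	# 각각의 돌더미에서 1개 이상 뺄 수 있는지에 대한 여부를 확인한다.
-- 	for x in range(1, N + 1):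
-- 		num, other = P[x], left[x - 1] ^ right[x + 1]
-- 		result += num > other
--
-- 	return result
-- ===== SOURCE B (Python) =====
-- def solve(N, P):
-- 	# single scalar total-XOR instead of prefix/suffix arrays
-- 	T = 0
-- 	for x in range(1, N + 1):
-- 		T ^= P[x]
-- 	result = 0
-- 	for x in range(1, N + 1):
-- 		result += P[x] > (T ^ P[x])
-- 	return result
-- ===== Notes on version B (the rewrite author's own statement) =====
-- stated objective: faster
-- what changed: B drops A's two O(N)-size prefix/suffix XOR arrays and instead computes the single total XOR T once, testing P[x] > T ^ P[x] (T ^ P[x] is the XOR of all other piles).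
import Mathlib
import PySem

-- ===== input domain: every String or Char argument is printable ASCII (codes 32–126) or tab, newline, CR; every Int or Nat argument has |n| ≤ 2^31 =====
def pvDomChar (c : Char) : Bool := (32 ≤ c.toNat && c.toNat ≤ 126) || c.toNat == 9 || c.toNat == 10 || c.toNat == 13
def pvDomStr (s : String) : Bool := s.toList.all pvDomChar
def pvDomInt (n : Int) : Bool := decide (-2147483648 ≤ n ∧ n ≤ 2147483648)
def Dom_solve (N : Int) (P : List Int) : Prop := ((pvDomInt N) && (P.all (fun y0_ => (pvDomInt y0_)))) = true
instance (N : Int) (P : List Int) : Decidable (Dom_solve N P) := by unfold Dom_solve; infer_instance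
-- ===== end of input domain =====

-- B replaces A's two prefix/suffix XOR arrays by the single scalar total XOR T, using T ^ P[x] as the XOR of the other piles.

-- ===== PORT A =====
-- A-side helper: the body of A's first loop (one simultaneous update of left and right), named for readability
def stepA (P : List Int) (N : Int) (st : List Int × List Int) (x : Int) : List Int × List Int :=
  (PySem.List.pySetD st.1 x
     (PySem.Int.bxor (PySem.List.pyGetD st.1 (x - 1) 0) (PySem.List.pyGetD P x 0)),
   PySem.List.pySetD st.2 (N + 1 - x)
     (PySem.Int.bxor (PySem.List.pyGetD st.2 (N + 1 - (x - 1)) 0) (PySem.List.pyGetD P (N + 1 - x) 0)))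

def solve (N : Int) (P : List Int) : Int :=
  let left0 : List Int := List.replicate (N + 2).toNat 0
  let right0 : List Int := List.replicate (N + 2).toNat 0
  let lr := (PySem.List.pyRange 1 (N + 1) 1).foldl (stepA P N) (left0, right0)
  (PySem.List.pyRange 1 (N + 1) 1).foldl
    (fun result x =>
      result + (if PySem.List.pyGetD P x 0 >
                   PySem.Int.bxor (PySem.List.pyGetD lr.1 (x - 1) 0) (PySem.List.pyGetD lr.2 (x + 1) 0)
                then 1 else 0)) 0

-- ===== PORT B =====
def solve_alt (N : Int) (P : List Int) : Int :=
  let T := (PySem.List.pyRange 1 (N + 1) 1).foldl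
    (fun t x => PySem.Int.bxor t (PySem.List.pyGetD P x 0)) 0
  (PySem.List.pyRange 1 (N + 1) 1).foldl
    (fun result x =>
      result + (if PySem.List.pyGetD P x 0 > PySem.Int.bxor T (PySem.List.pyGetD P x 0)
                then 1 else 0)) 0

-- ===== PRECONDITION & SPEC =====
-- A raises IndexError (at P[x]) exactly when N ≥ 1 and len(P) ≤ N; Pre_ excludes only those inputs.
def Pre_solve (N : Int) (P : List Int) : Prop := N ≤ 0 ∨ N + 1 ≤ (P.length : Int)
instance (N : Int) (P : List Int) : Decidable (Pre_solve N P) := by unfold Pre_solve; infer_instance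
def pvWitness_solve : Int × List Int := (2, [7, 3, 1])
def Spec_solve (N : Int) (P : List Int) (out : Int) : Prop := out = solve_alt N P
instance (N : Int) (P : List Int) (out : Int) : Decidable (Spec_solve N P out) := by unfold Spec_solve; infer_instance

-- ===== CLAIM (what is proved, stated in full; the proofs are below) =====
def Claim_equal_solve : Prop := ∀ (N : Int) (P : List Int), Dom_solve N P → Pre_solve N P → Spec_solve N P (solve N P)

-- ===== LEMMAS AND PROOFS =====

-- sign/magnitude encoding of Int, under which bxor acts componentwise
def encI (s : Bool) (m : Nat) : Int := if s then -(m : Int) - 1 else m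

theorem bxor_encI (s t : Bool) (a b : Nat) :
    PySem.Int.bxor (encI s a) (encI t b) = encI (xor s t) (a ^^^ b) := by
  cases s <;> cases t <;> simp [PySem.Int.bxor, encI]
  · intro h; exact absurd h (by omega)
  · intro h; exact absurd h (by omega)
  · split_ifs with h1 h2 h3
    · exact absurd h1 (by omega)
    · exact absurd h1 (by omega)
    · exact absurd h3 (by omega)
    · rfl

theorem exists_encI (x : Int) : ∃ s m, x = encI s m := by
  by_cases h : 0 ≤ x
  · exact ⟨false, x.toNat, by simp [encI]; omega⟩
  · exact ⟨true, (-x - 1).toNat, by simp [encI]; omega⟩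

theorem nat_xor_shuffle (x y z : Nat) : ((x ^^^ y) ^^^ z) ^^^ y = x ^^^ z := by
  rw [Nat.xor_assoc x y z, Nat.xor_comm y z, ← Nat.xor_assoc x z y,
      Nat.xor_assoc (x ^^^ z) y y, Nat.xor_self, Nat.xor_zero]

theorem bxor_shuffle (a p s : Int) :
    PySem.Int.bxor (PySem.Int.bxor (PySem.Int.bxor a p) s) p = PySem.Int.bxor a s := by
  obtain ⟨sa, ma, rfl⟩ := exists_encI a
  obtain ⟨sp, mp, rfl⟩ := exists_encI p
  obtain ⟨ss, ms, rfl⟩ := exists_encI s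
  simp only [bxor_encI]
  congr 1
  · cases sa <;> cases sp <;> cases ss <;> rfl
  · exact nat_xor_shuffle ma mp ms

theorem bxor_assoc (a b c : Int) :
    PySem.Int.bxor (PySem.Int.bxor a b) c = PySem.Int.bxor a (PySem.Int.bxor b c) := by
  obtain ⟨sa, ma, rfl⟩ := exists_encI a
  obtain ⟨sb, mb, rfl⟩ := exists_encI b
  obtain ⟨sc, mc, rfl⟩ := exists_encI c
  simp only [bxor_encI]
  congr 1
  · cases sa <;> cases sb <;> cases sc <;> rfl
  · exact Nat.xor_assoc ma mb mc

-- XOR of P[1..k]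
def xorPre (P : List Int) : Nat → Int
  | 0 => 0
  | k + 1 => PySem.Int.bxor (xorPre P k) (P.getD (k + 1) 0)

-- XOR of P[n-j+1..n] (the last j of P[1..n])
def xorSuf (P : List Int) (n : Nat) : Nat → Int
  | 0 => 0
  | j + 1 => PySem.Int.bxor (xorSuf P n j) (P.getD (n - j) 0)

theorem getD_set_eq (xs : List Int) (n m : Nat) (v d : Int) (h : n < xs.length) :
    (xs.set n v).getD m d = if m = n then v else xs.getD m d := by
  by_cases hmn : m = n
  · subst hmn
    simp [List.getD_eq_getElem?_getD, h]
  · simp [List.getD_eq_getElem?_getD, hmn, Ne.symm hmn]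

theorem xor_split (P : List Int) (n : Nat) :
    ∀ j, j ≤ n → xorPre P n = PySem.Int.bxor (xorPre P (n - j)) (xorSuf P n j) := by
  intro j
  induction j with
  | zero => exact fun _ => (PySem.Int.bxor_zero (xorPre P n)).symm
  | succ j ih =>
    intro hj
    have h1 : n - j = (n - (j + 1)) + 1 := by omega
    rw [ih (by omega), h1, xorPre, xorSuf]
    have h2 : n - (j + 1) + 1 = n - j := by omega
    rw [h2, bxor_assoc, PySem.Int.bxor_comm (P.getD (n - j) 0), ← bxor_assoc]

-- B's first loop computes xorPre
theorem tfold (P : List Int) (m : Nat) :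
    (PySem.List.pyRange 1 ((m : Int) + 1) 1).foldl
      (fun t x => PySem.Int.bxor t (PySem.List.pyGetD P x 0)) 0 = xorPre P m := by
  induction m with
  | zero =>
    rw [show ((0 : Nat) : Int) + 1 = 1 by norm_num, PySem.List.pyRange_one_eq_nil (le_refl 1)]
    rfl
  | succ m ih =>
    rw [show ((m + 1 : Nat) : Int) + 1 = ((m : Int) + 1) + 1 by push_cast; ring,
        PySem.List.pyRange_one_succ_right (by omega), List.foldl_append, ih]
    simp only [List.foldl_cons, List.foldl_nil]
    rw [show ((m : Int) + 1) = ((m + 1 : Nat) : Int) by push_cast; ring,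
        PySem.List.pyGetD_natCast]
    rfl

-- the invariant of A's array-building loop
theorem afold (P : List Int) (n : Nat) (m : Nat) (hm : m ≤ n) :
    ((PySem.List.pyRange 1 ((m : Int) + 1) 1).foldl (stepA P (n : Int))
        (List.replicate (n + 2) 0, List.replicate (n + 2) 0)).1.length = n + 2 ∧
    ((PySem.List.pyRange 1 ((m : Int) + 1) 1).foldl (stepA P (n : Int))
        (List.replicate (n + 2) 0, List.replicate (n + 2) 0)).2.length = n + 2 ∧
    (∀ k : Nat, k ≤ n + 1 →
      ((PySem.List.pyRange 1 ((m : Int) + 1) 1).foldl (stepA P (n : Int))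
          (List.replicate (n + 2) 0, List.replicate (n + 2) 0)).1.getD k 0
        = (if 1 ≤ k ∧ k ≤ m then xorPre P k else 0) ∧
      ((PySem.List.pyRange 1 ((m : Int) + 1) 1).foldl (stepA P (n : Int))
          (List.replicate (n + 2) 0, List.replicate (n + 2) 0)).2.getD k 0
        = (if n + 1 - m ≤ k ∧ k ≤ n then xorSuf P n (n + 1 - k) else 0)) := by
  induction m with
  | zero =>
    rw [show ((0 : Nat) : Int) + 1 = 1 by norm_num, PySem.List.pyRange_one_eq_nil (le_refl 1)]
    refine ⟨by simp, by simp, ?_⟩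
    intro k hk
    have hlt : k < n + 2 := by omega
    constructor <;>
      (simp only [List.foldl_nil, List.getD_eq_getElem?_getD, List.getElem?_replicate,
                  if_pos hlt, Option.getD_some]
       split_ifs with h
       · exact absurd h (by omega)
       · rfl)
  | succ m ih =>
    obtain ⟨hl, hr, hkv⟩ := ih (by omega)
    rw [show ((m + 1 : Nat) : Int) + 1 = ((m : Int) + 1) + 1 by push_cast; ring,
        PySem.List.pyRange_one_succ_right (by omega), List.foldl_append]
    simp only [List.foldl_cons, List.foldl_nil]
    set F := (PySem.List.pyRange 1 ((m : Int) + 1) 1).foldl (stepA P (n : Int))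
        (List.replicate (n + 2) 0, List.replicate (n + 2) 0) with hF
    unfold stepA
    rw [show (n : Int) + 1 - (((m : Int) + 1) - 1) = ((n - m + 1 : Nat) : Int) by
          push_cast [Nat.cast_sub (by omega : m ≤ n)]; ring,
        show (n : Int) + 1 - ((m : Int) + 1) = ((n - m : Nat) : Int) by
          push_cast [Nat.cast_sub (by omega : m ≤ n)]; ring,
        show ((m : Int) + 1) - 1 = ((m : Nat) : Int) by ring,
        show ((m : Int) + 1) = ((m + 1 : Nat) : Int) by push_cast; ring]
    simp only [PySem.List.pySetD_natCast, PySem.List.pyGetD_natCast]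
    have hvL : F.1.getD m 0 = xorPre P m := by
      rw [(hkv m (by omega)).1]
      split_ifs with h
      · rfl
      · have : m = 0 := by omega
        subst this; rfl
    have hvR : F.2.getD (n - m + 1) 0 = xorSuf P n m := by
      rw [(hkv (n - m + 1) (by omega)).2]
      split_ifs with h
      · congr 1; omega
      · have hm0 : m = 0 := by omega
        subst hm0; rfl
    refine ⟨?_, ?_, ?_⟩
    · simp [List.length_set, hl]
    · simp [List.length_set, hr]
    · intro k hk
      constructor
      · rw [getD_set_eq _ _ _ _ _ (by rw [hl]; omega), hvL, (hkv k hk).1]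
        by_cases hkm : k = m + 1
        · subst hkm; rw [if_pos rfl, if_pos (by omega)]; rfl
        · rw [if_neg hkm]
          have hiff : (1 ≤ k ∧ k ≤ m) ↔ (1 ≤ k ∧ k ≤ m + 1) := by omega
          simp only [hiff]
      · rw [getD_set_eq _ _ _ _ _ (by rw [hr]; omega), hvR, (hkv k hk).2]
        by_cases hkm : k = n - m
        · subst hkm; rw [if_pos rfl, if_pos (by omega)]
          rw [show n + 1 - (n - m) = m + 1 by omega]
          rfl
        · rw [if_neg hkm]
          have hiff : (n + 1 - m ≤ k ∧ k ≤ n) ↔ (n + 1 - (m + 1) ≤ k ∧ k ≤ n) := by omega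
          simp only [hiff]

-- ===== VERDICT (by name: the statement is the Claim_ definition above) =====

theorem solve_spec : Claim_equal_solve := by
  unfold Claim_equal_solve Spec_solve
  intro N P _ hpre
  by_cases hN : N ≤ 0
  · unfold solve solve_alt
    rw [PySem.List.pyRange_one_eq_nil (by omega : N + 1 ≤ 1)]
    rfl
  · have hP : N + 1 ≤ (P.length : Int) := hpre.resolve_left hN
    obtain ⟨n, rfl⟩ : ∃ n : Nat, N = (n : Int) := ⟨N.toNat, by omega⟩
    obtain ⟨hl, hr, hkv⟩ := afold P n n (le_refl n)
    unfold solve solve_alt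
    rw [show ((n : Int) + 2).toNat = n + 2 by omega]
    simp only []
    rw [tfold P n]
    apply PySem.List.foldl_congr_mem
    intro acc x hx
    obtain ⟨hxa, hxb⟩ := (PySem.List.mem_pyRange_one).1 hx
    obtain ⟨j, rfl⟩ : ∃ j : Nat, x = (j : Int) := ⟨x.toNat, by omega⟩
    have hj1 : 1 ≤ j := by omega
    have hjn : j ≤ n := by omega
    rw [show ((j : Int) - 1) = ((j - 1 : Nat) : Int) by push_cast [Nat.cast_sub hj1]; ring,
        show ((j : Int) + 1) = ((j + 1 : Nat) : Int) by push_cast; ring]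
    simp only [PySem.List.pyGetD_natCast]
    have hL : (((PySem.List.pyRange 1 ((n : Int) + 1) 1).foldl (stepA P (n : Int))
        (List.replicate (n + 2) 0, List.replicate (n + 2) 0)).1).getD (j - 1) 0
        = xorPre P (j - 1) := by
      rw [(hkv (j - 1) (by omega)).1]
      split_ifs with h
      · rfl
      · have hj0 : j - 1 = 0 := by omega
        rw [hj0]; rfl
    have hR : (((PySem.List.pyRange 1 ((n : Int) + 1) 1).foldl (stepA P (n : Int))
        (List.replicate (n + 2) 0, List.replicate (n + 2) 0)).2).getD (j + 1) 0
        = xorSuf P n (n - j) := by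
      rw [(hkv (j + 1) (by omega)).2]
      split_ifs with h
      · congr 1; omega
      · have hj0 : n - j = 0 := by omega
        rw [hj0]; rfl
    rw [hL, hR]
    have h5 := xor_split P n (n - j) (by omega)
    rw [show n - (n - j) = j by omega] at h5
    have h6 : xorPre P j = PySem.Int.bxor (xorPre P (j - 1)) (P.getD j 0) := by
      conv_lhs => rw [show j = (j - 1) + 1 by omega]
      simp only [xorPre]
      rw [show (j - 1) + 1 = j by omega]
    have key : PySem.Int.bxor (xorPre P (j - 1)) (xorSuf P n (n - j))
        = PySem.Int.bxor (xorPre P n) (P.getD j 0) := by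
      rw [h5, h6]
      exact (bxor_shuffle _ _ _).symm
    rw [key]
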